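-- pv_equiv track=rewrite | github.com/konradko/coding-challenges | decode_string/decode_string.py | get_decoded_string
-- ===== SOURCE A (Python) =====
-- def get_decoded_string(encoded_string: str):
--     stack = []
--
--     current_string = ""
--     current_multiplier = ""
--
--     for char in encoded_string:
--
--         if char.isdigit():
--             current_multiplier += char
--
--         if char == "[":
--             stack.append(current_string)
--             stack.append(current_multiplier)
--
--             current_string = ""
--             current_multiplier = ""
--
--         elif char.isalpha():
--             current_string += char
--
--         elif char == "]":
--             last_multiplier = stack.pop()
--             last_string = stack.pop()
--
--             current_string = f"{last_string}{current_string * int(last_multiplier)}"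
--
--     return current_string
-- ===== SOURCE B (Python) =====
-- def get_decoded_string(encoded_string: str):
--     # recursive-descent parser: one helper scans from an index, keeping a local
--     # result and multiplier per bracket frame; '[' recurses, ']' returns.
--     def helper(i):
--         result = ""
--         mult = ""
--         while i < len(encoded_string):
--             char = encoded_string[i]
--             if char.isdigit():
--                 mult += char
--                 i += 1
--             elif char == "[":
--                 inner, i = helper(i + 1)
--                 result += inner * int(mult)
--                 mult = ""
--             elif char == "]":
--                 return result, i + 1
--             elif char.isalpha():
--                 result += char
--                 i += 1
--             else:
--                 i += 1
--         return result, i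
--     return helper(0)[0]
-- ===== Notes on version B (the rewrite author's own statement) =====
-- stated objective: alternative
-- what changed: Replaced A's single left-to-right loop over an explicit two-entry-per-frame stack by a recursive-descent parser whose helper scans from an index with a per-frame result and multiplier, recursing on '[' and returning at ']'.
-- outside the precondition, e.g. on get_decoded_string('a2[b'): A returns 'b', B returns 'abb'; on get_decoded_string('2[a3]4[b]'): A returns 'aabbbbbbbbbbbbbbbbbbbbbbbbbbbbbbbbbb', B returns 'aabbbb'; on get_decoded_string('a[b'): A returns 'b', B raises ValueError
import Mathlib
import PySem

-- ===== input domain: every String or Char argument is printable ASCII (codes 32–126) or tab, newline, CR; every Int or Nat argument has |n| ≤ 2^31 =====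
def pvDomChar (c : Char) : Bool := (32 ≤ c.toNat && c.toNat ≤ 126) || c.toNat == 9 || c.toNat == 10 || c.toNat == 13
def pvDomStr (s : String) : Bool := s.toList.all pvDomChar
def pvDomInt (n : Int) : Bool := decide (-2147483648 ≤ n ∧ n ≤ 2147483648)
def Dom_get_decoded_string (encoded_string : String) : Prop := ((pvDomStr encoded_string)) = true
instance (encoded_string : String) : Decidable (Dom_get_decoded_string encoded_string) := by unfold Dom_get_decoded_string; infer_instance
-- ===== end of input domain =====

-- B is a recursive-descent parser (per-frame result/multiplier, recursion on '['), replacing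
-- A's single loop over an explicit stack; same cost, different decomposition ("alternative").

-- ===== PORT A =====
-- A's loop state: (stack, current_string, current_multiplier); A pushes current_string then
-- current_multiplier and pops them back as a pair, so the stack is a list of such pairs.
-- `none` = the loop has raised (pop from empty stack = IndexError, int('') = ValueError).
def pvStepA (acc : Option (List (List Char × List Char) × List Char × List Char)) (c : Char) :
    Option (List (List Char × List Char) × List Char × List Char) :=
  match acc with
  | none => none
  | some (stack, cur, mult) =>
    let mult := if PySem.Chars.isdigit c then mult ++ [c] else mult
    if c = '[' then some ((cur, mult) :: stack, [], [])
    else if PySem.Chars.isalpha c then some (stack, cur ++ [c], mult)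
    else if c = ']' then
      match stack with
      | (last_string, last_mult) :: rest =>
        match PySem.Int.ofChars? last_mult with
        | some n => some (rest, last_string ++ PySem.List.pyRepeat cur n, mult)
        | none => none
      | [] => none
    else some (stack, cur, mult)

def get_decoded_string (encoded_string : String) : String :=
  match encoded_string.toList.foldl pvStepA (some ([], [], [])) with
  | some (_, cur, _) => String.ofList cur
  | none => ""

-- ===== PORT B =====
-- helper(i) of Source B, over the remaining character list; returns (result, rest-after-']').
-- The subtype bound on the returned rest is only the termination measure.
-- `(…).getD 0` is reached exactly where Python B raises ValueError on int(''); outside Pre_.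
def pvParseB : (l : List Char) → (res : List Char) → (mult : List Char) →
    List Char × {r : List Char // r.length ≤ l.length}
  | [], res, _ => (res, ⟨[], Nat.le_refl 0⟩)
  | c :: t, res, mult =>
    if PySem.Chars.isdigit c then
      match pvParseB t res (mult ++ [c]) with
      | (o, ⟨r, h⟩) => (o, ⟨r, Nat.le_succ_of_le h⟩)
    else if c = '[' then
      match pvParseB t [] [] with
      | (inner, ⟨rest, h1⟩) =>
        match pvParseB rest (res ++ PySem.List.pyRepeat inner ((PySem.Int.ofChars? mult).getD 0)) [] with
        | (o, ⟨r, h2⟩) => (o, ⟨r, Nat.le_succ_of_le (Nat.le_trans h2 h1)⟩)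
    else if c = ']' then (res, ⟨t, Nat.le_succ_of_le (Nat.le_refl _)⟩)
    else if PySem.Chars.isalpha c then
      match pvParseB t (res ++ [c]) mult with
      | (o, ⟨r, h⟩) => (o, ⟨r, Nat.le_succ_of_le h⟩)
    else
      match pvParseB t res mult with
      | (o, ⟨r, h⟩) => (o, ⟨r, Nat.le_succ_of_le h⟩)
  termination_by l _ _ => l.length
  decreasing_by all_goals (simp_all; try omega)

def get_decoded_string_alt (encoded_string : String) : String :=
  String.ofList (pvParseB encoded_string.toList [] []).1

-- ===== PRECONDITION & SPEC =====
-- Pre_ = well-placed brackets: every ']' closes an open '[', every open '[' is closed, each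
-- '[' is preceded by an int()-parsable multiplier (a digit run), and no digits dangle before
-- a ']'.  Pre_ excludes malformed encodings on which A raises (IndexError/ValueError) or —
-- unmatched '[' / digits dangling before ']' — returns one of several equally defensible
-- values for input no specification covers, driven by leftover stack/multiplier state;
-- B there either raises or composes the frames as if end-of-input closed them.
def pvOk : List Char → Nat → List Char → Bool
  | [], d, _ => d == 0
  | c :: t, d, mult =>
    if PySem.Chars.isdigit c then pvOk t d (mult ++ [c])
    else if c = '[' then (PySem.Int.ofChars? mult).isSome && pvOk t (d + 1) []
    else if c = ']' then
      match d with
      | 0 => false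
      | d' + 1 => mult.isEmpty && pvOk t d' []
    else pvOk t d mult

def Pre_get_decoded_string (encoded_string : String) : Prop :=
  pvOk encoded_string.toList 0 [] = true
instance (encoded_string : String) : Decidable (Pre_get_decoded_string encoded_string) := by
  unfold Pre_get_decoded_string; infer_instance

def pvWitness_get_decoded_string : String := "2[a]"

def Spec_get_decoded_string (encoded_string : String) (out : String) : Prop := out = get_decoded_string_alt encoded_string
instance (encoded_string : String) (out : String) : Decidable (Spec_get_decoded_string encoded_string out) := by unfold Spec_get_decoded_string; infer_instance

-- ===== CLAIM (what is proved, stated in full; the proofs are below) =====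
def Claim_equal_get_decoded_string : Prop := ∀ (encoded_string : String), Dom_get_decoded_string encoded_string → Pre_get_decoded_string encoded_string → Spec_get_decoded_string encoded_string (get_decoded_string encoded_string)

-- ===== LEMMAS AND PROOFS =====

lemma pv_lb_digit : PySem.Chars.isdigit '[' = false := by decide
lemma pv_rb_digit : PySem.Chars.isdigit ']' = false := by decide
lemma pv_rb_alpha : PySem.Chars.isalpha ']' = false := by decide

lemma pv_digit_not_alpha (c : Char) (h : PySem.Chars.isdigit c = true) :
    PySem.Chars.isalpha c = false := by
  simp only [PySem.Chars.isdigit, Bool.and_eq_true, decide_eq_true_eq] at h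
  obtain ⟨h0, h9⟩ := h
  simp only [PySem.Chars.isalpha, PySem.Chars.isupper, PySem.Chars.islower, Bool.or_eq_false_iff,
    Bool.and_eq_false_iff, decide_eq_false_iff_not]
  constructor
  · left; intro hA; exact absurd (le_trans hA h9) (by decide)
  · left; intro ha; exact absurd (le_trans ha h9) (by decide)

lemma pv_digit_ne_lb (c : Char) (h : PySem.Chars.isdigit c = true) : c ≠ '[' := by
  rintro rfl; simp [PySem.Chars.isdigit] at h

lemma pv_digit_ne_rb (c : Char) (h : PySem.Chars.isdigit c = true) : c ≠ ']' := by
  rintro rfl; simp [PySem.Chars.isdigit] at h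

lemma pvOk_rest (l res mult : List Char) :
    ∀ (d : Nat) (ms : List Char), pvOk l (d + 1) ms = true →
      pvOk (pvParseB l res mult).2.1 d [] = true := by
  fun_induction pvParseB l res mult with
  | case1 mult res => intro d ms h; simp [pvOk] at h
  | case2 c t res mult hdig o r hr hx ih =>
    intro d ms h
    simp only [pvOk, hdig, if_pos] at h
    simpa [hx] using ih d (ms ++ [c]) h
  | case3 t res mult inner rest1 h1 hx1 o r h2 hx2 hdig ih2 ih1 =>
    intro d ms h
    simp [pvOk] at h
    have hrest1 : pvOk rest1 (d + 1) [] = true := by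
      simpa [hx1] using ih2 (d + 1) [] h.2
    simpa [hx2] using ih1 d [] hrest1
  | case4 t res mult hdig hlb =>
    intro d ms h
    simp [pvOk] at h
    exact h.2
  | case5 c t res mult hdig hlb hrb halpha o r hr hx ih =>
    intro d ms h
    simp [pvOk, hdig, hlb, hrb] at h
    simpa [hx] using ih d ms h
  | case6 c t res mult hdig hlb hrb halpha o r hr hx ih =>
    intro d ms h
    simp [pvOk, hdig, hlb, hrb] at h
    simpa [hx] using ih d ms h

lemma pvMain (l res mult : List Char) :
    ∀ (frames : List (List Char × List Char)),
      pvOk l frames.length mult = true →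
      (∀ p ∈ frames, (PySem.Int.ofChars? p.2).isSome = true) →
      (match frames with
       | [] => ∃ multF, List.foldl pvStepA (some ([], res, mult)) l
                  = some ([], (pvParseB l res mult).1, multF)
       | (c0, m0) :: fr' =>
           List.foldl pvStepA (some (frames, res, mult)) l
             = List.foldl pvStepA
                 (some (fr', c0 ++ PySem.List.pyRepeat (pvParseB l res mult).1
                          ((PySem.Int.ofChars? m0).getD 0), []))
                 (pvParseB l res mult).2.1) := by
  fun_induction pvParseB l res mult with
  | case1 mult res =>
    rintro (_ | ⟨⟨c0, m0⟩, fr⟩) hOk hInv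
    · exact ⟨mult, by simp⟩
    · simp [pvOk] at hOk
  | case2 c t res mult hdig o r hr hx ih =>
    intro frames hOk hInv
    simp only [pvOk, hdig, if_pos] at hOk
    have step : pvStepA (some (frames, res, mult)) c = some (frames, res, mult ++ [c]) := by
      simp [pvStepA, hdig, pv_digit_ne_lb c hdig, pv_digit_not_alpha c hdig, pv_digit_ne_rb c hdig]
    have H := ih frames hOk hInv
    rcases frames with _ | ⟨⟨c0, m0⟩, fr⟩
    · dsimp only
      obtain ⟨multF, hEq⟩ := H
      refine ⟨multF, ?_⟩
      rw [List.foldl_cons, step]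
      simpa [pvParseB, hdig, hx] using hEq
    · dsimp only at H ⊢
      rw [List.foldl_cons, step]
      simpa [pvParseB, hdig, hx] using H
  | case3 t res mult inner rest1 h1 hx1 o r h2 hx2 hdig ih2 ih1 =>
    intro frames hOk hInv
    simp [pvOk] at hOk
    obtain ⟨hMult, hOkT⟩ := hOk
    have step : pvStepA (some (frames, res, mult)) '[' = some ((res, mult) :: frames, [], []) := by
      simp [pvStepA, pv_lb_digit]
    have hIn : ∀ p ∈ (res, mult) :: frames, (PySem.Int.ofChars? p.2).isSome = true := by
      intro p hp
      rcases List.mem_cons.1 hp with rfl | hp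
      · exact hMult
      · exact hInv p hp
    have H2 := ih2 ((res, mult) :: frames) (by simpa using hOkT) hIn
    dsimp only at H2
    simp only [hx1] at H2
    have hOkRest : pvOk rest1 frames.length [] = true := by
      simpa [hx1] using pvOk_rest t [] [] frames.length [] hOkT
    have H1 := ih1 frames hOkRest hInv
    rcases frames with _ | ⟨⟨c0, m0⟩, fr⟩
    · dsimp only
      obtain ⟨multF, hEq⟩ := H1
      refine ⟨multF, ?_⟩
      rw [List.foldl_cons, step, H2]
      simpa [pvParseB, pv_lb_digit, hx1, hx2] using hEq
    · dsimp only at H1 ⊢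
      rw [List.foldl_cons, step, H2]
      simpa [pvParseB, pv_lb_digit, hx1, hx2] using H1
  | case4 t res mult hdig hlb =>
    intro frames hOk hInv
    rcases frames with _ | ⟨⟨c0, m0⟩, fr⟩
    · simp [pvOk, pv_rb_digit] at hOk
    · simp [pvOk, pv_rb_digit] at hOk
      obtain ⟨hEmpty, hOkT⟩ := hOk
      obtain ⟨n, hn⟩ := Option.isSome_iff_exists.1 (hInv (c0, m0) (by simp))
      have hMultNil : mult = [] := by simpa using hEmpty
      subst hMultNil
      have step : pvStepA (some ((c0, m0) :: fr, res, [])) ']'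
          = some (fr, c0 ++ PySem.List.pyRepeat res n, []) := by
        simp [pvStepA, pv_rb_digit, pv_rb_alpha, hn]
      dsimp only
      rw [List.foldl_cons, step]
      simp [hn]
  | case5 c t res mult hdig hlb hrb halpha o r hr hx ih =>
    intro frames hOk hInv
    simp [pvOk, hdig, hlb, hrb] at hOk
    have step : pvStepA (some (frames, res, mult)) c = some (frames, res ++ [c], mult) := by
      simp [pvStepA, hdig, hlb, halpha]
    have H := ih frames hOk hInv
    rcases frames with _ | ⟨⟨c0, m0⟩, fr⟩
    · dsimp only
      obtain ⟨multF, hEq⟩ := H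
      refine ⟨multF, ?_⟩
      rw [List.foldl_cons, step]
      simpa [pvParseB, hdig, hlb, hrb, halpha, hx] using hEq
    · dsimp only at H ⊢
      rw [List.foldl_cons, step]
      simpa [pvParseB, hdig, hlb, hrb, halpha, hx] using H
  | case6 c t res mult hdig hlb hrb halpha o r hr hx ih =>
    intro frames hOk hInv
    simp [pvOk, hdig, hlb, hrb] at hOk
    have step : pvStepA (some (frames, res, mult)) c = some (frames, res, mult) := by
      simp [pvStepA, hdig, hlb, hrb, halpha]
    have H := ih frames hOk hInv
    rcases frames with _ | ⟨⟨c0, m0⟩, fr⟩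
    · dsimp only
      obtain ⟨multF, hEq⟩ := H
      refine ⟨multF, ?_⟩
      rw [List.foldl_cons, step]
      simpa [pvParseB, hdig, hlb, hrb, halpha, hx] using hEq
    · dsimp only at H ⊢
      rw [List.foldl_cons, step]
      simpa [pvParseB, hdig, hlb, hrb, halpha, hx] using H

-- ===== VERDICT (by name: the statement is the Claim_ definition above) =====
theorem get_decoded_string_spec : Claim_equal_get_decoded_string := by
  intro s _ hpre
  unfold Spec_get_decoded_string get_decoded_string get_decoded_string_alt
  have h := pvMain s.toList [] [] [] hpre (by intro p hp; cases hp)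
  obtain ⟨multF, hEq⟩ := h
  rw [hEq]
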